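-- pv_equiv track=rewrite | github.com/Nagachma/Tfo | tfograph2_cppsimilartrail.py | filter_duplicaterows
-- ===== SOURCE A (Python) =====
-- def filter_duplicaterows(points_list):
--     '''
--     filters datapoints -multiple entries for
--     study code are combined if providing organization
--     is different else any one row is considered.
--     '''
--     filtereddata_points=dict()
--     for value in points_list:
--         study_code=value[0]
--         providing_organization=value[2]
--         if study_code not in filtereddata_points.keys():
--             filtereddata_points[study_code]=value
--         elif study_code in filtereddata_points.keys():
--             if filtereddata_points[study_code][2]==providing_organization:
--                 continue
--             elif filtereddata_points[study_code][2]!=providing_organization: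
--                 yaxis_value=(value[1]+filtereddata_points[study_code][1])
--                 filtereddata_points[study_code][1]=yaxis_value
--     return filtereddata_points
-- ===== SOURCE B (Python) =====
-- def filter_duplicaterows(points_list):
--     '''
--     filters datapoints -multiple entries for
--     study code are combined if providing organization
--     is different else any one row is considered.
--     '''
--     # Pass 1: group rows by study code (insertion order preserved).
--     groups = {}
--     for row in points_list:
--         groups.setdefault(row[0], []).append(row)
--     # Pass 2: the first row of each group survives (mutated in place, like A);
--     # later rows with a different providing organization prepend their y value.
--     result = {}
--     for code, rows in groups.items():
--         survivor = rows[0]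
--         org = survivor[2]
--         for row in rows[1:]:
--             if row[2] != org:
--                 survivor[1] = row[1] + survivor[1]
--         result[code] = survivor
--     return result
-- ===== Notes on version B (the rewrite author's own statement) =====
-- stated objective: alternative
-- what changed: Replaces A's single pass that interleaves dict lookups and in-place merging with a two-pass group-then-reduce decomposition: first an insertion-ordered grouping of rows by study code, then an independent reduction of each group against its first row's organization.
import Mathlib
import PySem

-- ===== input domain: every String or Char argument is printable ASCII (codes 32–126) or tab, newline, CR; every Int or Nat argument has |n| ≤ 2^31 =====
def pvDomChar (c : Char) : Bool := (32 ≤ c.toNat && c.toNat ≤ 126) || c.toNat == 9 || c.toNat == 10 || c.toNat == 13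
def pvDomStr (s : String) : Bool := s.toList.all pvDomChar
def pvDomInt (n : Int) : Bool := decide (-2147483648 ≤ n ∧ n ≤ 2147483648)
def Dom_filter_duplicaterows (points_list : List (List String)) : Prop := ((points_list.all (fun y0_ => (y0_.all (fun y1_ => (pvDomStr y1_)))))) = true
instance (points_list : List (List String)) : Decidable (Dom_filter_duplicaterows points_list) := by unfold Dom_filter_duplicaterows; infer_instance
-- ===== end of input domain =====

-- B combines duplicate rows by a two-pass group-then-reduce decomposition instead of A's
-- single interleaved pass; return values agree (both Pythons mutate the first row of each
-- group in place — the equivalence proved here is about the returned dict).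

-- ===== PORT A =====
def filter_duplicaterows (points_list : List (List String)) : List (String × List String) :=
  (points_list.foldl (fun filtereddata_points value =>
    let study_code := PySem.List.pyGetD value 0 ""
    let providing_organization := PySem.List.pyGetD value 2 ""
    if filtereddata_points.contains study_code = false then
      filtereddata_points.insert study_code value
    else
      -- elif study_code in keys
      if PySem.List.pyGetD (filtereddata_points.getD study_code []) 2 "" == providing_organization then
        filtereddata_points            -- continue
      else
        -- elif stored[2] != providing_organization
        let yaxis_value := PySem.List.pyGetD value 1 "" ++ PySem.List.pyGetD (filtereddata_points.getD study_code []) 1 ""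
        filtereddata_points.insert study_code
          (PySem.List.pySetD (filtereddata_points.getD study_code []) 1 yaxis_value)
    ) PySem.Dict.empty).items

-- ===== PORT B =====
-- merge of one group: survivor = rows[0], compared against org = survivor[2]
def pvMergeGroup (survivor : List String) (rest : List (List String)) : List String :=
  let org := PySem.List.pyGetD survivor 2 ""
  rest.foldl (fun s row =>
    if (PySem.List.pyGetD row 2 "" == org) = false then
      PySem.List.pySetD s 1 (PySem.List.pyGetD row 1 "" ++ PySem.List.pyGetD s 1 "")
    else s) survivor

def filter_duplicaterows_alt (points_list : List (List String)) : List (String × List String) :=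
  let groups : PySem.Dict String (List (List String)) :=
    points_list.foldl (fun g row => g.modify (PySem.List.pyGetD row 0 "") [] (· ++ [row])) PySem.Dict.empty
  (groups.items.foldl (fun result p =>
      match p.2 with
      | [] => result                       -- unreachable: every group is nonempty
      | survivor :: rest => result.insert p.1 (pvMergeGroup survivor rest)
    ) PySem.Dict.empty).items

-- ===== PRECONDITION & SPEC =====
-- Pre excludes exactly the inputs where Python A raises IndexError: a row shorter than 3
-- (value[0] / value[2] are read for every row).
def Pre_filter_duplicaterows (points_list : List (List String)) : Prop :=
  ∀ row ∈ points_list, 3 ≤ row.length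
instance (points_list : List (List String)) : Decidable (Pre_filter_duplicaterows points_list) := by unfold Pre_filter_duplicaterows; infer_instance
def pvWitness_filter_duplicaterows : List (List String) :=
  [["a", "1", "x"], ["a", "2", "y"], ["b", "3", "x"]]
def Spec_filter_duplicaterows (points_list : List (List String)) (out : List (String × List String)) : Prop := out = filter_duplicaterows_alt points_list
instance (points_list : List (List String)) (out : List (String × List String)) : Decidable (Spec_filter_duplicaterows points_list out) := by unfold Spec_filter_duplicaterows; infer_instance

-- ===== CLAIM (what is proved, stated in full; the proofs are below) =====
def Claim_equal_filter_duplicaterows : Prop := ∀ (points_list : List (List String)), Dom_filter_duplicaterows points_list → Pre_filter_duplicaterows points_list → Spec_filter_duplicaterows points_list (filter_duplicaterows points_list)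

-- ===== LEMMAS AND PROOFS =====

-- common spec: the dedup'd key list, each key paired with the reduction of its group
def pvKey (r : List String) : String := PySem.List.pyGetD r 0 ""
def pvG1 (r : List String) : String := PySem.List.pyGetD r 1 ""
def pvG2 (r : List String) : String := PySem.List.pyGetD r 2 ""

def pvStepB (org : String) (s row : List String) : List String :=
  if (pvG2 row == org) = false then PySem.List.pySetD s 1 (pvG1 row ++ pvG1 s) else s

def pvReduce (rows : List (List String)) : List String :=
  match rows with
  | [] => []
  | r0 :: rest => pvMergeGroup r0 rest

def pvGroup (l : List (List String)) (k : String) : List (List String) :=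
  l.filter (fun r => pvKey r == k)

def pvKeys (l : List (List String)) : List String := PySem.Set.ofList (l.map pvKey)

def pvSpecItems (l : List (List String)) : List (String × List String) :=
  (pvKeys l).map (fun k => (k, pvReduce (pvGroup l k)))

def pvStepA (filtereddata_points : PySem.Dict String (List String)) (value : List String) :
    PySem.Dict String (List String) :=
    let study_code := PySem.List.pyGetD value 0 ""
    let providing_organization := PySem.List.pyGetD value 2 ""
    if filtereddata_points.contains study_code = false then
      filtereddata_points.insert study_code value
    else
      if PySem.List.pyGetD (filtereddata_points.getD study_code []) 2 "" == providing_organization then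
        filtereddata_points
      else
        let yaxis_value := PySem.List.pyGetD value 1 "" ++ PySem.List.pyGetD (filtereddata_points.getD study_code []) 1 ""
        filtereddata_points.insert study_code
          (PySem.List.pySetD (filtereddata_points.getD study_code []) 1 yaxis_value)

lemma pvA_unfold (l : List (List String)) :
    filter_duplicaterows l = (l.foldl pvStepA PySem.Dict.empty).items := rfl


lemma pvKey_def (r : List String) : PySem.List.pyGetD r 0 "" = pvKey r := rfl
lemma pvG1_def (r : List String) : PySem.List.pyGetD r 1 "" = pvG1 r := rfl
lemma pvG2_def (r : List String) : PySem.List.pyGetD r 2 "" = pvG2 r := rfl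

lemma pvMergeGroup_eq_foldl (r0 : List String) (rest : List (List String)) :
    pvMergeGroup r0 rest = rest.foldl (pvStepB (pvG2 r0)) r0 := rfl

lemma pvG2_pySetD (s : List String) (v : String) :
    pvG2 (PySem.List.pySetD s 1 v) = pvG2 s := by
  simp [pvG2, pysem, PySem.List.pySetD_of_nonneg]

lemma pvG2_foldl_stepB (rest : List (List String)) (org : String) :
    ∀ s, pvG2 (rest.foldl (pvStepB org) s) = pvG2 s := by
  induction rest with
  | nil => intro s; rfl
  | cons r rs ih =>
    intro s
    simp only [List.foldl_cons, ih]
    unfold pvStepB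
    split <;> simp [pvG2_pySetD]

lemma pvG2_mergeGroup (r0 : List String) (rest : List (List String)) :
    pvG2 (pvMergeGroup r0 rest) = pvG2 r0 := by
  rw [pvMergeGroup_eq_foldl, pvG2_foldl_stepB]

lemma pvMergeGroup_append (r0 : List String) (rest : List (List String)) (x : List String) :
    pvMergeGroup r0 (rest ++ [x]) = pvStepB (pvG2 r0) (pvMergeGroup r0 rest) x := by
  rw [pvMergeGroup_eq_foldl, pvMergeGroup_eq_foldl, List.foldl_append]
  rfl

lemma pvMk_map_get? (ks : List String) (f : String → List String) (x : String) (hnd : ks.Nodup) :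
    (PySem.Dict.mk (ks.map (fun k => (k, f k)))).get? x =
      if x ∈ ks then some (f x) else none := by
  induction ks with
  | nil => simp [PySem.Dict.get?]
  | cons k ks ih =>
    simp only [List.map_cons, PySem.Dict.get?_mk_cons]
    rcases List.nodup_cons.mp hnd with ⟨hk, hnd'⟩
    by_cases hkx : k = x
    · subst hkx; simp [hk]
    · simp only [beq_iff_eq, hkx, if_false, ih hnd', List.mem_cons]
      by_cases hx : x ∈ ks <;> simp [hx, Ne.symm hkx]

lemma pvGroup_append (l : List (List String)) (x : List String) (k : String) :
    pvGroup (l ++ [x]) k = pvGroup l k ++ (if pvKey x = k then [x] else []) := by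
  unfold pvGroup
  rw [List.filter_append]
  by_cases h : pvKey x = k <;> simp [h]

lemma pvGroup_nil_of_not_mem (l : List (List String)) (k : String) (h : k ∉ l.map pvKey) :
    pvGroup l k = [] := by
  rw [pvGroup, List.filter_eq_nil_iff]
  intro r hr
  simp only [beq_iff_eq]
  intro he
  exact h (he ▸ List.mem_map_of_mem hr)

lemma pvGroup_ne_nil_of_mem (l : List (List String)) (k : String) (h : k ∈ l.map pvKey) :
    pvGroup l k ≠ [] := by
  rcases List.mem_map.mp h with ⟨r, hr, hk⟩
  intro hnil
  rw [pvGroup, List.filter_eq_nil_iff] at hnil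
  have h2 := hnil r hr
  rw [hk] at h2
  simp at h2

lemma pvKeys_append (l : List (List String)) (x : List String) :
    pvKeys (l ++ [x]) = PySem.Set.add (pvKeys l) (pvKey x) := by
  rw [pvKeys, List.map_append, List.map_singleton, PySem.Set.ofList_append_singleton]
  rfl

lemma pvMem_keys (l : List (List String)) (k : String) :
    k ∈ pvKeys l ↔ k ∈ l.map pvKey := by unfold pvKeys; exact PySem.Set.mem_ofList _ _

lemma pvNodup_keys (l : List (List String)) : (pvKeys l).Nodup := PySem.Set.nodup_ofList _

-- the A-side loop computes the spec items, by induction from the right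
lemma pvA_foldl_eq_spec (l : List (List String)) :
    l.foldl pvStepA PySem.Dict.empty = PySem.Dict.mk (pvSpecItems l) := by
  induction l using List.reverseRecOn with
  | nil => rfl
  | append_singleton l x ih =>
    rw [List.foldl_append, ih, List.foldl_cons, List.foldl_nil]
    have hget : ∀ y, (PySem.Dict.mk (pvSpecItems l)).get? y =
        if y ∈ pvKeys l then some (pvReduce (pvGroup l y)) else none := by
      intro y; exact pvMk_map_get? (pvKeys l) _ y (pvNodup_keys l)
    have hcont : ∀ y, (PySem.Dict.mk (pvSpecItems l)).contains y =
        decide (y ∈ pvKeys l) := by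
      intro y
      rw [PySem.Dict.contains_eq_isSome_get?, hget]
      by_cases hy : y ∈ pvKeys l <;> simp [hy]
    by_cases hmem : pvKey x ∈ l.map pvKey
    · -- key already present
      have hmemK : pvKey x ∈ pvKeys l := (pvMem_keys l _).mpr hmem
      obtain ⟨r0, rest, hg⟩ : ∃ r0 rest, pvGroup l (pvKey x) = r0 :: rest := by
        cases hG : pvGroup l (pvKey x) with
        | nil => exact absurd hG (pvGroup_ne_nil_of_mem l _ hmem)
        | cons a b => exact ⟨a, b, rfl⟩
      have hacc : (PySem.Dict.mk (pvSpecItems l)).getD (pvKey x) [] =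
          pvReduce (pvGroup l (pvKey x)) := by
        rw [PySem.Dict.getD_eq_get?_getD, hget]
        simp [hmemK]
      have hg2 : pvG2 (pvReduce (pvGroup l (pvKey x))) = pvG2 r0 := by
        rw [hg]; exact pvG2_mergeGroup r0 rest
      have hkeq : pvKeys (l ++ [x]) = pvKeys l := by
        rw [pvKeys_append, PySem.Set.add_of_mem hmemK]
      -- the updated group reduces by one more B-step
      have hgrow : pvReduce (pvGroup (l ++ [x]) (pvKey x)) =
          pvStepB (pvG2 r0) (pvReduce (pvGroup l (pvKey x))) x := by
        rw [pvGroup_append, if_pos rfl, hg]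
        show pvReduce (r0 :: (rest ++ [x])) = _
        rw [pvReduce, pvReduce, pvMergeGroup_append]
      show pvStepA (PySem.Dict.mk (pvSpecItems l)) x = _
      simp only [pvStepA, pvKey_def, pvG1_def, pvG2_def, hcont, hacc]
      rw [if_neg (by simp [hmemK])]
      by_cases heq : (pvG2 (pvReduce (pvGroup l (pvKey x))) == pvG2 x) = true
      · -- same organization: dict unchanged, and the spec entry is unchanged too
        rw [if_pos heq]
        have hstep : pvStepB (pvG2 r0) (pvReduce (pvGroup l (pvKey x))) x =
            pvReduce (pvGroup l (pvKey x)) := by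
          unfold pvStepB
          have hx : (pvG2 x == pvG2 r0) = true := by
            rw [beq_iff_eq] at heq ⊢
            rw [← heq, hg2]
          simp [hx]
        apply PySem.Dict.ext
        show pvSpecItems l = pvSpecItems (l ++ [x])
        unfold pvSpecItems
        rw [hkeq]
        apply List.map_congr_left
        intro k hk
        by_cases hkk : k = pvKey x
        · subst hkk; rw [hgrow, hstep]
        · rw [pvGroup_append, if_neg (fun h => hkk h.symm), List.append_nil]
      · -- different organization: overwrite the stored row with the y-merged row
        rw [if_neg heq]
        have hcontT : (PySem.Dict.mk (pvSpecItems l)).contains (pvKey x) = true := by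
          rw [hcont]; simp [hmemK]
        apply PySem.Dict.ext
        rw [PySem.Dict.items_insert_of_contains _ _ hcontT]
        show (pvSpecItems l).map _ = pvSpecItems (l ++ [x])
        unfold pvSpecItems
        rw [hkeq, List.map_map]
        apply List.map_congr_left
        intro k hk
        by_cases hkk : k = pvKey x
        · subst hkk
          simp only [Function.comp_apply, beq_self_eq_true, if_pos]
          rw [hgrow]
          unfold pvStepB
          have hne : (pvG2 x == pvG2 r0) = false := by
            rw [← hg2]
            rw [Bool.not_eq_true] at heq
            rw [beq_eq_false_iff_ne] at heq ⊢
            exact fun h => heq h.symm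
          rw [if_pos (by rw [hne])]
        · simp only [Function.comp_apply, beq_iff_eq, hkk, if_false]
          rw [pvGroup_append, if_neg (fun h => hkk h.symm), List.append_nil]
    · -- fresh key: appended at the end
      have hmemK : pvKey x ∉ pvKeys l := fun h => hmem ((pvMem_keys l _).mp h)
      show pvStepA (PySem.Dict.mk (pvSpecItems l)) x = _
      simp only [pvStepA, pvKey_def, pvG1_def, pvG2_def, hcont]
      rw [if_pos (by simp [hmemK])]
      apply PySem.Dict.ext
      rw [PySem.Dict.items_insert_of_not_contains _ _ (by rw [hcont]; simp [hmemK])]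
      show pvSpecItems l ++ [(pvKey x, x)] = pvSpecItems (l ++ [x])
      unfold pvSpecItems
      rw [pvKeys_append, PySem.Set.add_of_not_mem hmemK, List.map_append]
      congr 1
      · apply List.map_congr_left
        intro k hk
        have hkk : k ≠ pvKey x := by
          intro h; exact hmemK (h ▸ hk)
        rw [pvGroup_append, if_neg (fun h => hkk h.symm), List.append_nil]
      · rw [List.map_singleton]
        rw [pvGroup_append, if_pos rfl, pvGroup_nil_of_not_mem l _ hmem, List.nil_append]
        rfl

-- the B-side two-pass computation also yields the spec items
lemma pvB_eq_spec (l : List (List String)) :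
    filter_duplicaterows_alt l = pvSpecItems l := by
  have key_fold : filter_duplicaterows_alt l =
      ((l.foldl (fun g row => g.modify (pvKey row) [] (· ++ [row])) PySem.Dict.empty).items.foldl
        (fun result p =>
          match p.2 with
          | [] => result
          | survivor :: rest => result.insert p.1 (pvMergeGroup survivor rest))
        PySem.Dict.empty).items := rfl
  rw [key_fold]
  have hfold : l.foldl (fun g row => g.modify (pvKey row) [] (· ++ [row]))
        (PySem.Dict.empty : PySem.Dict String (List (List String))) =
      (l.map (fun r => (pvKey r, r))).foldl (fun g p => g.modify p.1 [] (· ++ [p.2]))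
        PySem.Dict.empty := by
    rw [List.foldl_map]
  have hkeys : (l.foldl (fun g row => g.modify (pvKey row) [] (· ++ [row]))
        (PySem.Dict.empty : PySem.Dict String (List (List String)))).keys = pvKeys l := by
    rw [PySem.Dict.keys_foldl_modify_key l pvKey [] (fun _ x => (· ++ [x]))]
    simp [PySem.Set.update_nil_left, pvKeys]
  have hgetD : ∀ k, (l.foldl (fun g row => g.modify (pvKey row) [] (· ++ [row]))
        (PySem.Dict.empty : PySem.Dict String (List (List String)))).getD k [] = pvGroup l k := by
    intro k
    rw [hfold, PySem.Dict.getD_foldl_modify_append]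
    rw [List.filter_map, List.map_map]
    simp [pvGroup, Function.comp_def]
  have hitems : (l.foldl (fun g row => g.modify (pvKey row) [] (· ++ [row]))
        (PySem.Dict.empty : PySem.Dict String (List (List String)))).items =
      (pvKeys l).map (fun k => (k, pvGroup l k)) := by
    rw [PySem.Dict.items_eq_map_keys _ (by rw [hkeys]; exact pvNodup_keys l) []]
    rw [hkeys]
    exact List.map_congr_left (fun k _ => by rw [hgetD])
  rw [hitems]
  have hcongr : ((pvKeys l).map (fun k => (k, pvGroup l k))).foldl
      (fun result (p : String × List (List String)) =>
        match p.2 with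
        | [] => result
        | survivor :: rest => result.insert p.1 (pvMergeGroup survivor rest))
      PySem.Dict.empty =
    ((pvKeys l).map (fun k => (k, pvGroup l k))).foldl
      (fun result p => result.insert p.1 (pvReduce p.2)) PySem.Dict.empty := by
    apply PySem.List.foldl_congr_mem
    intro acc p hp
    rcases List.mem_map.mp hp with ⟨k, hk, hpk⟩
    have hne : p.2 ≠ [] := by
      rw [← hpk]
      exact pvGroup_ne_nil_of_mem l k ((pvMem_keys l k).mp hk)
    cases h2 : p.2 with
    | nil => exact absurd h2 hne
    | cons a b => simp [pvReduce]
  rw [hcongr]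
  rw [PySem.Dict.items_foldl_insert_fresh _ Prod.fst (fun p => pvReduce p.2) PySem.Dict.empty
        (fun a _ => PySem.Dict.contains_empty _)
        (by rw [List.map_map]; simpa [Function.comp_def] using pvNodup_keys l)]
  simp [pvSpecItems, List.map_map, Function.comp_def, PySem.Dict.empty]

-- ===== VERDICT (by name: the statement is the Claim_ definition above) =====
theorem filter_duplicaterows_spec : Claim_equal_filter_duplicaterows := by
  intro l _ _
  show filter_duplicaterows l = filter_duplicaterows_alt l
  rw [pvA_unfold, pvA_foldl_eq_spec, pvB_eq_spec]
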